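-- pv_equiv track=rewrite | github.com/svalinn/ALARA | src/DataLib/fendl32B_retrofit/reaction_data.py | count_emitted_particles
-- ===== SOURCE A (Python) =====
-- def count_emitted_particles(particle, emitted_particle_string):
--     """
--     Count emitted particles from a reaction given a target particle
--         and the particles produced in a neutron activation reaction.
--
--     Arguments:
--         particle (str): Name of the target particle produced in the reaction.
--             Options include n, p, alpha, d, t, and 3He, corresponding to
--             neutrons, protons, alpha particles, deuterons, tritons,
--             and helium-3 nuclides.
--         emitted_particle_string (str): Particle product(s) of the neutron
--             activation, of the format 'p' for a single proton for example or
--             '2n' for two neutrons etc.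
--
--     Returns:
--         particle_count (int or None): Count of the target particle present in
--             the product. If particles not present, returns None rather than 0.
--     """
--
--     particle_index = emitted_particle_string.find(particle)
--     number_str = ''
--     for i in range(particle_index - 1, -1, -1):
--         if emitted_particle_string[i].isdigit():
--             number_str = emitted_particle_string[i] + number_str
--         else:
--             break
--
--     if number_str:
--         particle_count = int(number_str)
--     elif particle in emitted_particle_string:
--         particle_count = 1
--     else:
--         particle_count = None
--
--     return particle_count
-- ===== SOURCE B (Python) =====
-- def count_emitted_particles(particle, emitted_particle_string):
--     """Single forward pass: walk the product string once, keeping the current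
--     run of consecutive digits; at the first position where the target particle
--     starts, that run is its multiplicity (1 if the run is empty)."""
--     if not particle:
--         return 1
--     run = ''
--     rest = emitted_particle_string
--     while True:
--         if rest.startswith(particle):
--             return int(run) if run else 1
--         if not rest:
--             return None
--         ch = rest[0]
--         rest = rest[1:]
--         run = run + ch if ch.isdigit() else ''
-- ===== Notes on version B (the rewrite author's own statement) =====
-- stated objective: alternative
-- what changed: Replaces find() followed by a separate backward digit-scan with a single forward pass that maintains the current consecutive-digit run and returns it at the first position where the particle name starts.
import Mathlib
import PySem

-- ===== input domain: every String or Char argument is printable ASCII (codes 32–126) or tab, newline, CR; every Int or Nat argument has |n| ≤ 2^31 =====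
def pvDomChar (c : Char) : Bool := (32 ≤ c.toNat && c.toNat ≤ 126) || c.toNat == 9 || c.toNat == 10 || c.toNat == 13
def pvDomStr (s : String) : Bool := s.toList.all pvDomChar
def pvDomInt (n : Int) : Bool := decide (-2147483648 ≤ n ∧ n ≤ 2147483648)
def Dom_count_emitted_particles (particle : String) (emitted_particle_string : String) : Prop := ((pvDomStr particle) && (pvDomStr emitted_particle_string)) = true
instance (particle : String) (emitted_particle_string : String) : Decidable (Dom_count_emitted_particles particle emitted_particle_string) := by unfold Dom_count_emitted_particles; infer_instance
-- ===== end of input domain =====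

-- B is an alternative single forward pass (no find(), no backward scan); equivalence is proved for all inputs (A is total).

-- ===== PORT A =====
-- the backward digit-collecting loop with its break: recursion over the index list;
-- the 'none' branch of pyGet? is unreachable (every generated index is in range)
def pvA_loop (cs : List Char) : List Int → List Char → List Char
  | [], number_str => number_str
  | i :: is, number_str =>
    match PySem.List.pyGet? cs i with
    | some c => if PySem.Chars.isdigit c then pvA_loop cs is (c :: number_str) else number_str
    | none => number_str

def count_emitted_particles (particle : String) (emitted_particle_string : String) : Option Int :=
  let cs := emitted_particle_string.toList
  let particle_index := PySem.Chars.find cs particle.toList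
  let number_str := pvA_loop cs (PySem.List.pyRange (particle_index - 1) (-1) (-1)) []
  if number_str ≠ [] then PySem.Int.ofChars? number_str
  else if PySem.Chars.isIn particle.toList cs then some 1
  else none

-- ===== PORT B =====
-- forward pass: 'run' is the current consecutive-digit run just before 'rest'
def pvB_loop (p : List Char) (run : List Char) (rest : List Char) : Option Int :=
  if PySem.Chars.startswith rest p then
    (if run ≠ [] then PySem.Int.ofChars? run else some 1)
  else
    match rest with
    | [] => none
    | c :: cs => pvB_loop p (if PySem.Chars.isdigit c then run ++ [c] else []) cs
termination_by rest.length

def count_emitted_particles_alt (particle : String) (emitted_particle_string : String) : Option Int :=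
  if particle.toList = [] then some 1
  else pvB_loop particle.toList [] emitted_particle_string.toList

-- ===== PRECONDITION & SPEC =====
def Spec_count_emitted_particles (particle : String) (emitted_particle_string : String) (out : Option Int) : Prop := out = count_emitted_particles_alt particle emitted_particle_string
instance (particle : String) (emitted_particle_string : String) (out : Option Int) : Decidable (Spec_count_emitted_particles particle emitted_particle_string out) := by unfold Spec_count_emitted_particles; infer_instance

-- ===== CLAIM (what is proved, stated in full; the proofs are below) =====
def Claim_equal_count_emitted_particles : Prop := ∀ (particle : String) (emitted_particle_string : String), Dom_count_emitted_particles particle emitted_particle_string → Spec_count_emitted_particles particle emitted_particle_string (count_emitted_particles particle emitted_particle_string)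

-- ===== LEMMAS AND PROOFS =====

-- the maximal consecutive-digit suffix of a list
def pvDSuffix (l : List Char) : List Char := (l.reverse.takeWhile PySem.Chars.isdigit).reverse

theorem pvDSuffix_all_digits (l : List Char) (h : ∀ c ∈ l, PySem.Chars.isdigit c = true) :
    pvDSuffix l = l := by
  unfold pvDSuffix
  rw [List.takeWhile_eq_self_iff.mpr (by intro c hc; exact h c (List.mem_reverse.mp hc)), List.reverse_reverse]

theorem pvDSuffix_append_digit (l : List Char) (c : Char) (h : PySem.Chars.isdigit c = true) :
    pvDSuffix (l ++ [c]) = pvDSuffix l ++ [c] := by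
  unfold pvDSuffix
  simp [h]

theorem pvDSuffix_append_nondigit (l : List Char) (c : Char) (h : PySem.Chars.isdigit c = false) :
    pvDSuffix (l ++ [c]) = [] := by
  unfold pvDSuffix
  simp [h]

theorem pvTakeWhile_append_nondigit (l m : List Char) (c : Char) (h : PySem.Chars.isdigit c = false) :
    (l ++ c :: m).takeWhile PySem.Chars.isdigit = l.takeWhile PySem.Chars.isdigit := by
  induction l with
  | nil => simp [h]
  | cons d l ih => by_cases hd : PySem.Chars.isdigit d <;> simp [hd, ih]

theorem pvDSuffix_middle_nondigit (run t : List Char) (c : Char) (h : PySem.Chars.isdigit c = false) :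
    pvDSuffix (run ++ c :: t) = pvDSuffix t := by
  unfold pvDSuffix
  have : (run ++ c :: t).reverse = t.reverse ++ c :: run.reverse := by simp
  rw [this, pvTakeWhile_append_nondigit _ _ _ h]

-- find on a cons, when the pattern is not a prefix
theorem pvFind_cons (p : List Char) (c : Char) (cs : List Char)
    (_hp : p ≠ []) (hinf : p <:+: (c :: cs)) (hnpre : ¬ p <+: (c :: cs)) :
    p <:+: cs ∧ (PySem.Chars.find (c :: cs) p).toNat = (PySem.Chars.find cs p).toNat + 1 := by
  have h0 : 0 ≤ PySem.Chars.find (c :: cs) p := (PySem.Chars.find_nonneg_iff _ _).mpr hinf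
  obtain ⟨hpre, hmin⟩ := PySem.Chars.find_spec h0
  set k := (PySem.Chars.find (c :: cs) p).toNat with hk
  have hkpos : k ≠ 0 := by
    intro h; rw [h] at hpre; simp at hpre; exact hnpre hpre
  obtain ⟨k', rfl'⟩ : ∃ k', k = k' + 1 := ⟨k - 1, by omega⟩
  have hdrop : (c :: cs).drop (k' + 1) = cs.drop k' := by simp
  rw [rfl'] at hpre
  rw [hdrop] at hpre
  have hinf' : p <:+: cs := ((PySem.Chars.isIn_iff_infix _ _).mp
    ((PySem.Chars.exists_prefix_drop_iff_isIn _ _).mp ⟨k', hpre⟩))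
  have h0' : 0 ≤ PySem.Chars.find cs p := (PySem.Chars.find_nonneg_iff _ _).mpr hinf'
  obtain ⟨hpre', hmin'⟩ := PySem.Chars.find_spec h0'
  set k2 := (PySem.Chars.find cs p).toNat with hk2
  refine ⟨hinf', ?_⟩
  have hle1 : k2 ≤ k' := by
    by_contra hlt
    exact hmin' k' (by omega) hpre
  have hle2 : k' ≤ k2 := by
    by_contra hlt
    have : p <+: (c :: cs).drop (k2 + 1) := by simpa using hpre'
    exact hmin (k2 + 1) (by rw [rfl']; omega) this
  rw [rfl']; omega

theorem pvFind_of_prefix (s p : List Char) (hpre : p <+: s) :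
    (PySem.Chars.find s p).toNat = 0 := by
  have hinf : p <:+: s := hpre.isInfix
  have h0 : 0 ≤ PySem.Chars.find s p := (PySem.Chars.find_nonneg_iff _ _).mpr hinf
  obtain ⟨_, hmin⟩ := PySem.Chars.find_spec h0
  by_contra h
  exact hmin 0 (by omega) (by simpa using hpre)

-- A's backward loop collects exactly the consecutive-digit suffix of the first k characters
theorem pvA_loop_eq (cs : List Char) (k : Nat) (hk : k ≤ cs.length) (acc : List Char) :
    pvA_loop cs (PySem.List.pyRange ((k : Int) - 1) (-1) (-1)) acc = pvDSuffix (cs.take k) ++ acc := by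
  induction k generalizing acc with
  | zero =>
    rw [PySem.List.pyRange_neg_one_eq_nil (by norm_num)]
    simp [pvA_loop, pvDSuffix]
  | succ k ih =>
    have hcons : PySem.List.pyRange ((k : Int) + 1 - 1) (-1) (-1)
        = (k : Int) :: PySem.List.pyRange ((k : Int) - 1) (-1) (-1) := by
      have := PySem.List.pyRange_neg_one_cons (a := (k : Int)) (b := (-1)) (by omega)
      simpa using this
    push_cast
    rw [hcons]
    have hklt : k < cs.length := by omega
    have hget : PySem.List.pyGet? cs ((k : Nat) : Int) = some cs[k] := by
      simp [PySem.List.pyGet?_natCast, List.getElem?_eq_getElem hklt]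
    have htake : cs.take (k + 1) = cs.take k ++ [cs[k]] := by
      rw [List.take_add_one]; simp [List.getElem?_eq_getElem hklt]
    unfold pvA_loop
    rw [hget]
    by_cases hd : PySem.Chars.isdigit cs[k] = true
    · simp only [hd, if_pos]
      rw [ih (by omega) (cs[k] :: acc), htake, pvDSuffix_append_digit _ _ hd]
      simp
    · have hd' : PySem.Chars.isdigit cs[k] = false := by simpa using hd
      simp only [hd', Bool.false_eq_true, if_neg, not_false_iff]
      rw [htake, pvDSuffix_append_nondigit _ _ hd']
      simp

-- the crux: the forward pass equals "find the first occurrence, then take the digit run before it"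
theorem pvB_loop_eq (p : List Char) (hp : p ≠ []) (rest run : List Char)
    (hrun : ∀ c ∈ run, PySem.Chars.isdigit c = true) :
    pvB_loop p run rest =
      if p <:+: rest then
        (if pvDSuffix (run ++ rest.take (PySem.Chars.find rest p).toNat) = [] then some 1
         else PySem.Int.ofChars? (pvDSuffix (run ++ rest.take (PySem.Chars.find rest p).toNat)))
      else none := by
  induction rest generalizing run with
  | nil =>
    have hnpre : ¬ p <+: ([] : List Char) := by simpa [List.prefix_nil] using hp
    have hninf : ¬ p <:+: ([] : List Char) := by simpa [List.infix_nil] using hp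
    unfold pvB_loop
    rw [if_neg (by simp [PySem.Chars.startswith_iff, hnpre]), if_neg hninf]
  | cons c cs ih =>
    by_cases hpre : p <+: (c :: cs)
    · have hinf : p <:+: (c :: cs) := hpre.isInfix
      unfold pvB_loop
      rw [if_pos (by simp [PySem.Chars.startswith_iff, hpre]), if_pos hinf,
        pvFind_of_prefix _ _ hpre]
      simp only [List.take_zero, List.append_nil]
      rw [pvDSuffix_all_digits run hrun]
      by_cases hr : run = [] <;> simp [hr]
    · unfold pvB_loop
      rw [if_neg (by simp [PySem.Chars.startswith_iff, hpre])]
      show pvB_loop p (if PySem.Chars.isdigit c = true then run ++ [c] else []) cs = _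
      by_cases hinf : p <:+: (c :: cs)
      · obtain ⟨hinf', hfind⟩ := pvFind_cons p c cs hp hinf hpre
        rw [if_pos hinf, hfind]
        have htake : (c :: cs).take ((PySem.Chars.find cs p).toNat + 1)
            = c :: cs.take (PySem.Chars.find cs p).toNat := by simp
        rw [htake]
        by_cases hd : PySem.Chars.isdigit c = true
        · have hrun' : ∀ d ∈ run ++ [c], PySem.Chars.isdigit d = true := by
            intro d hd'
            rcases List.mem_append.mp hd' with h | h
            · exact hrun d h
            · simp at h; subst h; exact hd
          have hmid : run ++ c :: cs.take (PySem.Chars.find cs p).toNat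
              = (run ++ [c]) ++ cs.take (PySem.Chars.find cs p).toNat := by simp
          rw [hmid, if_pos hd, ih (run ++ [c]) hrun', if_pos hinf']
        · have hd' : PySem.Chars.isdigit c = false := by simpa using hd
          rw [pvDSuffix_middle_nondigit _ _ _ hd', if_neg hd,
            ih [] (by simp), if_pos hinf']
          simp
      · have hninf' : ¬ p <:+: cs := fun h => hinf (h.trans (List.suffix_cons c cs).isInfix)
        have hrun2 : ∀ d ∈ (if PySem.Chars.isdigit c = true then run ++ [c] else []),
            PySem.Chars.isdigit d = true := by
          by_cases hd : PySem.Chars.isdigit c = true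
          · intro d hd'
            rw [if_pos hd] at hd'
            rcases List.mem_append.mp hd' with h | h
            · exact hrun d h
            · simp at h; subst h; exact hd
          · simp [hd]
        rw [if_neg hinf, ih _ hrun2, if_neg hninf']

-- ===== VERDICT (by name: the statement is the Claim_ definition above) =====
theorem count_emitted_particles_spec : Claim_equal_count_emitted_particles := by
  intro particle s _
  dsimp only [Spec_count_emitted_particles, count_emitted_particles, count_emitted_particles_alt]
  generalize particle.toList = p
  generalize s.toList = cs
  by_cases hp : p = []
  · rw [hp, if_pos rfl, PySem.Chars.find_nil cs]
    rw [show (0 : Int) - 1 = -1 by norm_num, PySem.List.pyRange_neg_one_eq_nil (by norm_num)]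
    simp [pvA_loop, PySem.Chars.isIn_nil]
  · rw [if_neg hp, pvB_loop_eq p hp cs [] (by simp)]
    by_cases hinf : p <:+: cs
    · have h0 : 0 ≤ PySem.Chars.find cs p := (PySem.Chars.find_nonneg_iff _ _).mpr hinf
      have hIn : PySem.Chars.isIn p cs = true := (PySem.Chars.isIn_iff_infix _ _).mpr hinf
      have hle : (PySem.Chars.find cs p).toNat ≤ cs.length := by
        have := PySem.Chars.find_le_length cs p; omega
      have hidx : PySem.Chars.find cs p = ((PySem.Chars.find cs p).toNat : Int) := by omega
      rw [if_pos hinf]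
      conv_lhs => rw [hidx]
      rw [pvA_loop_eq cs (PySem.Chars.find cs p).toNat hle []]
      simp only [List.append_nil, List.nil_append]
      by_cases hds : pvDSuffix (cs.take (PySem.Chars.find cs p).toNat) = []
      · rw [if_neg (by simpa using hds), if_pos hIn, if_pos hds]
      · rw [if_pos hds, if_neg (by simpa using hds)]
    · have hfind : PySem.Chars.find cs p = -1 := (PySem.Chars.find_eq_neg_one_iff _ _).mpr hinf
      have hIn : PySem.Chars.isIn p cs = false := by
        rw [← Bool.not_eq_true, PySem.Chars.isIn_iff_infix]; exact hinf
      rw [if_neg hinf, hfind]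
      rw [show (-1 : Int) - 1 = -2 by norm_num, PySem.List.pyRange_neg_one_eq_nil (by norm_num)]
      simp [pvA_loop, hIn]
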